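-- pv_equiv track=rewrite | github.com/A1isuru/Labs | prog/lab— 12/main.py | analyze_car_exports
-- ===== SOURCE A (Python) =====
-- def analyze_car_exports(car_brands, exports):
--     delivered_to_all = set(car_brands)
--     for country, brands in exports.items():
--         delivered_to_all.intersection_update(brands)
--
--     delivered_to_some = set()
--     for country, brands in exports.items():
--         delivered_to_some.update(brands)
--
--     not_delivered = set(car_brands) - delivered_to_some
--
--     return delivered_to_all, delivered_to_some, not_delivered
-- ===== SOURCE B (Python) =====
-- def analyze_car_exports(car_brands, exports):
--     # one pass: count, for each brand, how many countries export it (distinct per country)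
--     counter = {}
--     for brands in exports.values():
--         for b in dict.fromkeys(brands):
--             counter[b] = counter.get(b, 0) + 1
--     n = len(exports)
--     delivered_to_all = {b for b in car_brands if counter.get(b, 0) == n}
--     delivered_to_some = set(counter)
--     not_delivered = {b for b in car_brands if counter.get(b, 0) == 0}
--     return delivered_to_all, delivered_to_some, not_delivered
-- ===== Notes on version B (the rewrite author's own statement) =====
-- stated objective: alternative
-- what changed: Replaces A's two fold passes of set intersection/union (each rescanning a shrinking/growing set) by a single counting pass building a per-brand country count, from which all three result sets are read off by simple count comparisons (count==len(exports), key set, count==0).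
import Mathlib
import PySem

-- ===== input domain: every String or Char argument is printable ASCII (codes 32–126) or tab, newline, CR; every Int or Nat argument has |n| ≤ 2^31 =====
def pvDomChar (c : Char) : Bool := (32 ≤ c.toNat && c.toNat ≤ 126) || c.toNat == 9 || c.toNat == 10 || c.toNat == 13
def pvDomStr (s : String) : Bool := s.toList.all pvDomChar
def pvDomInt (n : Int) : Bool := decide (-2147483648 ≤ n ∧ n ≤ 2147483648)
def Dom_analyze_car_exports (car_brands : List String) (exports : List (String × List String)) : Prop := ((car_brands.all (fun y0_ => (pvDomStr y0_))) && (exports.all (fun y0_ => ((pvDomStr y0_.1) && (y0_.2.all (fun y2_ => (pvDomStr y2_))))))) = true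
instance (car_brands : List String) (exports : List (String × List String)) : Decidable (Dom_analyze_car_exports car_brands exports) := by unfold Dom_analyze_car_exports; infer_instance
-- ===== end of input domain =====

-- B replaces A's two intersection/union fold passes by one counting pass (per-brand country counts), reading all three sets off the counter; alternative decomposition, similar cost here.


-- ===== PORT A =====
def analyze_car_exports (car_brands : List String) (exports : List (String × List String)) : List String × List String × List String :=
  let delivered_to_all := exports.foldl (fun s p => PySem.Set.inter s p.2) (PySem.Set.ofList car_brands)
  let delivered_to_some := exports.foldl (fun s p => PySem.Set.update s p.2) PySem.Set.empty
  let not_delivered := PySem.Set.diff (PySem.Set.ofList car_brands) delivered_to_some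
  (delivered_to_all, delivered_to_some, not_delivered)

-- ===== PORT B =====
def analyze_car_exports_alt (car_brands : List String) (exports : List (String × List String)) : List String × List String × List String :=
  let counter := exports.foldl (fun d p => (PySem.List.dedup p.2).foldl (fun d b => d.insert b (d.getD b 0 + 1)) d) PySem.Dict.empty
  let n : Int := exports.length
  let delivered_to_all := (PySem.Set.ofList car_brands).filter (fun b => counter.getD b 0 == n)
  let delivered_to_some := counter.keys
  let not_delivered := (PySem.Set.ofList car_brands).filter (fun b => counter.getD b 0 == 0)
  (delivered_to_all, delivered_to_some, not_delivered)

-- ===== PRECONDITION & SPEC =====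
def Spec_analyze_car_exports (car_brands : List String) (exports : List (String × List String)) (out : List String × List String × List String) : Prop := out = analyze_car_exports_alt car_brands exports
instance (car_brands : List String) (exports : List (String × List String)) (out : List String × List String × List String) : Decidable (Spec_analyze_car_exports car_brands exports out) := by unfold Spec_analyze_car_exports; infer_instance

-- ===== CLAIM (what is proved, stated in full; the proofs are below) =====
def Claim_equal_analyze_car_exports : Prop := ∀ (car_brands : List String) (exports : List (String × List String)), Dom_analyze_car_exports car_brands exports → Spec_analyze_car_exports car_brands exports (analyze_car_exports car_brands exports)

-- ===== LEMMAS AND PROOFS =====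

-- B's counter loop is literally Counter over the per-country-deduped flattening of the brand lists.
theorem counter_loop_eq (exports : List (String × List String)) :
    exports.foldl (fun d p => (PySem.List.dedup p.2).foldl (fun d b => d.insert b (d.getD b 0 + 1)) d) PySem.Dict.empty
      = PySem.Dict.counter (exports.flatMap (fun p => PySem.List.dedup p.2)) := by
  rw [← PySem.Dict.foldl_insert_getD_add_one_eq_counter, List.foldl_flatMap]

-- count of b in the flattening = number of countries whose brand list contains b
theorem count_flat (exports : List (String × List String)) (b : String) :
    (exports.flatMap (fun p => PySem.List.dedup p.2)).count b
      = exports.countP (fun p => p.2.contains b) := by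
  induction exports with
  | nil => rfl
  | cons p es ih =>
      simp only [List.flatMap_cons, List.count_append, List.countP_cons, ih]
      by_cases hb : b ∈ p.2
      · have hmem : b ∈ PySem.List.dedup p.2 := by
          simpa [PySem.List.dedup, PySem.Set.mem_ofList] using hb
        have hnd : (PySem.List.dedup p.2).Nodup := by
          simpa [PySem.List.dedup] using PySem.Set.nodup_ofList (xs := p.2)
        rw [List.count_eq_one_of_mem hnd hmem]
        simp [hb]
        omega
      · rw [List.count_eq_zero_of_not_mem (by simpa [PySem.List.dedup, PySem.Set.mem_ofList] using hb)]
        simp [hb]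
      
theorem foldl_inter (exports : List (String × List String)) (s : List String) :
    exports.foldl (fun s p => PySem.Set.inter s p.2) s
      = s.filter (fun b => exports.all (fun p => p.2.contains b)) := by
  induction exports generalizing s with
  | nil => simp
  | cons p es ih =>
      rw [List.foldl_cons, show PySem.Set.inter s p.2 = s.filter (fun x => PySem.Set.contains p.2 x) from rfl, ih]
      simp only [List.filter_filter, List.all_cons, PySem.Set.contains_eq_listContains]
      exact List.filter_congr (fun x _ => Bool.and_comm _ _)

theorem foldl_update (exports : List (String × List String)) :
    exports.foldl (fun s p => PySem.Set.update s p.2) PySem.Set.empty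
      = PySem.Set.ofList (exports.flatMap (fun p => PySem.List.dedup p.2)) := by
  induction exports using List.reverseRecOn with
  | nil => rfl
  | append_singleton es p ih =>
      simp only [List.foldl_append, List.foldl_cons, List.foldl_nil, List.flatMap_append,
        List.flatMap_cons, List.flatMap_nil, List.append_nil, PySem.Set.ofList_append, ih]
      rw [PySem.Set.update_eq_append_filter, PySem.Set.update_eq_append_filter]
      simp [PySem.List.dedup, PySem.Set.ofList_ofList]

theorem countP_len_iff (exports : List (String × List String)) (b : String) :
    exports.countP (fun p => p.2.contains b) = exports.length ↔ exports.all (fun p => p.2.contains b) = true := by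
  rw [List.countP_eq_length, List.all_eq_true]

theorem countP_zero_iff (exports : List (String × List String)) (b : String) :
    exports.countP (fun p => p.2.contains b) = 0 ↔ b ∉ exports.flatMap (fun p => PySem.List.dedup p.2) := by
  rw [List.countP_eq_zero, List.mem_flatMap]
  simp [PySem.List.dedup, PySem.Set.mem_ofList]

-- ===== VERDICT (by name: the statement is the Claim_ definition above) =====
theorem analyze_car_exports_spec : Claim_equal_analyze_car_exports := by
  intro car_brands exports _
  unfold Spec_analyze_car_exports analyze_car_exports analyze_car_exports_alt
  rw [counter_loop_eq]
  dsimp only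
  refine Prod.ext ?_ (Prod.ext ?_ ?_)
  · -- delivered_to_all
    rw [foldl_inter]
    refine List.filter_congr ?_
    intro b _
    rw [Bool.eq_iff_iff, ← countP_len_iff]
    simp only [beq_iff_eq, PySem.Dict.getD_counter, count_flat]
    exact ⟨fun h => by exact_mod_cast h, fun h => by exact_mod_cast h⟩
  · -- delivered_to_some
    rw [foldl_update, PySem.Dict.keys_counter]
  · -- not_delivered
    rw [foldl_update]
    show List.filter _ _ = List.filter _ _
    refine List.filter_congr ?_
    intro b _
    have hc : (PySem.Set.contains (PySem.Set.ofList (List.flatMap (fun p => PySem.List.dedup p.2) exports)) b = true)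
        ↔ ¬ (exports.countP (fun p => p.2.contains b) = 0) := by
      rw [PySem.Set.contains_iff, PySem.Set.mem_ofList, countP_zero_iff]
      exact not_not.symm
    have hg : (((PySem.Dict.counter (List.flatMap (fun p => PySem.List.dedup p.2) exports)).getD b 0 == (0 : Int)) = true)
        ↔ exports.countP (fun p => p.2.contains b) = 0 := by
      rw [beq_iff_eq, PySem.Dict.getD_counter, count_flat, Nat.cast_eq_zero]
    rw [Bool.eq_iff_iff, Bool.not_eq_true', Bool.eq_false_iff, hg]
    simp only [Ne, hc, not_not]
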